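-- pv_equiv track=rewrite | github.com/rluna-Devoteam/Portfolio | IA_code/Queen's_problem_programm.py | fitnessagente
-- ===== SOURCE A (Python) =====
-- def fitnessagente(agente):                                                       #recorrer agente para comprobar si hay otras reinas en sus diagonales
--
--     col = 0                                                                      #variable manual para movernos por las columnas
--     lin = 0                                                                      #variable manual para movernos por las lineas
--     contador = 0                                                                 #variable para guardar si se tocan en diagonal las reinas
--
--     for q1 in agente:
--
--         col = 0
--
--         for q2 in agente:
--
--             if abs(q1 - q2) == abs(lin - col):                                   #con las variables manuales podemos comprobar si de forma "diagonal" nuestra reina tiene el mismo numero que otra reina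
--
--                 contador += 1                                                    #sumamos si hay una reina en nuestra diagonal
--
--             col += 1                                                             #saltamos columna dentro del bucle
--
--         lin += 1                                                                 #saltamos linea dentro del bucle
--
--     #este bucle tiene el problema que las reinas se detectaran una a otra en caso de chocar, por ello al devolver el resultado se debera restar tanto como tantas reinas haya
--     return contador - len(agente)                                                #a mayor el contador, con mas reinas esta tocando en sus diagonales
-- ===== SOURCE B (Python) =====
-- def fitnessagente(agente):
--     diag = {}
--     anti = {}
--     for i, q in enumerate(agente):
--         d = q - i
--         diag[d] = diag.get(d, 0) + 1
--         s = q + i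
--         anti[s] = anti.get(s, 0) + 1
--     total = 0
--     for c in diag.values():
--         total += c * c
--     for c in anti.values():
--         total += c * c
--     return total - 2 * len(agente)
-- ===== Notes on version B (the rewrite author's own statement) =====
-- stated objective: faster
-- what changed: Replaced the O(n^2) all-pairs double loop with a single pass that buckets queens by their two diagonal keys (q-i and q+i) in counting dicts and sums c*c per bucket, subtracting 2*len for the self-pairs.
import Mathlib
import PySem

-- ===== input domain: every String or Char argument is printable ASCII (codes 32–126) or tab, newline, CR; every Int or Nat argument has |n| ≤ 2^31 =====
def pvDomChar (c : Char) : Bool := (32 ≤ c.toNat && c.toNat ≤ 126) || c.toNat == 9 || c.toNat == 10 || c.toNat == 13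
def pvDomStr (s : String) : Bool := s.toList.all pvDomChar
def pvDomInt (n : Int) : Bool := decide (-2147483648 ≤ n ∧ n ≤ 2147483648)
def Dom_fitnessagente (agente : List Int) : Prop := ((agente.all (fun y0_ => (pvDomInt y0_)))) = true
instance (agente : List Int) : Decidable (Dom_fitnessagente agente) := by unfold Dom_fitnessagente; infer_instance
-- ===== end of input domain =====

-- B replaces A's O(n^2) double loop by bucketing queens per diagonal key (q-i and q+i)
-- in two counting dicts and summing c*c per bucket: an asymptotically faster O(n) pass.

-- ===== PORT A =====
def fitnessagente (agente : List Int) : Int :=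
  let st := agente.foldl (fun (outer : Int × Int) q1 =>
      let inner := agente.foldl (fun (st2 : Int × Int) q2 =>
          (st2.1 + 1, if |q1 - q2| = |outer.1 - st2.1| then st2.2 + 1 else st2.2))
        ((0 : Int), outer.2)
      (outer.1 + 1, inner.2))
    ((0 : Int), (0 : Int))
  st.2 - agente.length

-- ===== PORT B =====
def fitnessagente_alt (agente : List Int) : Int :=
  let dicts := (PySem.List.enumerate agente).foldl
      (fun (ds : PySem.Dict Int Int × PySem.Dict Int Int) p =>
        (ds.1.insert (p.2 - p.1) (ds.1.getD (p.2 - p.1) 0 + 1),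
         ds.2.insert (p.2 + p.1) (ds.2.getD (p.2 + p.1) 0 + 1)))
      (PySem.Dict.empty, PySem.Dict.empty)
  let t1 := dicts.1.values.foldl (fun t c => t + c * c) (0 : Int)
  let t2 := dicts.2.values.foldl (fun t c => t + c * c) t1
  t2 - 2 * agente.length

-- ===== PRECONDITION & SPEC =====
def Spec_fitnessagente (agente : List Int) (out : Int) : Prop := out = fitnessagente_alt agente
instance (agente : List Int) (out : Int) : Decidable (Spec_fitnessagente agente out) := by unfold Spec_fitnessagente; infer_instance

-- ===== CLAIM (what is proved, stated in full; the proofs are below) =====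
def Claim_equal_fitnessagente : Prop := ∀ (agente : List Int), Dom_fitnessagente agente → Spec_fitnessagente agente (fitnessagente agente)

-- ===== LEMMAS AND PROOFS =====

-- the number of queens on the same diagonal as the queen p (queen p itself included twice)
def pvN (agente : List Int) (p : Int × Int) : Nat :=
  (PySem.List.enumerate agente).countP (fun p' => decide (|p.2 - p'.2| = |p.1 - p'.1|))

-- count of queens whose diagonal key (under f) matches that of p
def pvT (ks : List Int) : Int := (ks.map (fun x => (ks.count x : Int))).sum

theorem pv_countP_or (l : List (Int × Int)) (p q : (Int × Int) → Bool) :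
    l.countP (fun x => p x || q x) + l.countP (fun x => p x && q x) = l.countP p + l.countP q := by
  induction l with
  | nil => rfl
  | cons a t ih => simp only [List.countP_cons]; cases hp : p a <;> cases hq : q a <;> simp [hp, hq] <;> try omega

theorem pv_inner (l : List Int) (q1 lin : Int) : ∀ (col c : Int),
    l.foldl (fun (st2 : Int × Int) q2 =>
        (st2.1 + 1, if |q1 - q2| = |lin - st2.1| then st2.2 + 1 else st2.2)) (col, c)
    = (col + l.length,
       c + ((PySem.List.enumerate l col).countP (fun p => decide (|q1 - p.2| = |lin - p.1|)) : Int)) := by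
  induction l with
  | nil => intro col c; simp [PySem.List.enumerate_nil]
  | cons x t ih =>
    intro col c
    simp only [List.foldl_cons, PySem.List.enumerate_cons, List.countP_cons]
    rw [ih]
    rw [Prod.ext_iff]
    refine ⟨by simp only [List.length_cons]; push_cast; omega, ?_⟩
    by_cases h : |q1 - x| = |lin - col| <;> simp [h] <;> omega

theorem pv_outer (agente : List Int) (l : List Int) : ∀ (lin c : Int),
    l.foldl (fun (outer : Int × Int) q1 =>
        (outer.1 + 1,
         (agente.foldl (fun (st2 : Int × Int) q2 =>
            (st2.1 + 1, if |q1 - q2| = |outer.1 - st2.1| then st2.2 + 1 else st2.2))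
          ((0 : Int), outer.2)).2)) (lin, c)
    = (lin + l.length,
       c + ((PySem.List.enumerate l lin).map (fun p => (pvN agente p : Int))).sum) := by
  induction l with
  | nil => intro lin c; simp [PySem.List.enumerate_nil]
  | cons x t ih =>
    intro lin c
    simp only [List.foldl_cons, PySem.List.enumerate_cons, List.map_cons, List.sum_cons]
    rw [pv_inner, ih]
    simp only [pvN]
    rw [Prod.ext_iff]
    refine ⟨by simp only [List.length_cons]; push_cast; omega, by push_cast; ring⟩

theorem pv_enumerate_nodup (agente : List Int) : (PySem.List.enumerate agente 0).Nodup := by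
  have h := PySem.List.pairwise_lt_enumerate agente 0
  exact h.imp (fun {a b} hlt => by intro he; rw [he] at hlt; exact lt_irrefl _ hlt)

theorem pv_pointwise (agente : List Int) (p : Int × Int)
    (hp : p ∈ PySem.List.enumerate agente 0) :
    (pvN agente p : Int)
      = (((PySem.List.enumerate agente 0).map (fun p' => p'.2 - p'.1)).count (p.2 - p.1) : Int)
      + (((PySem.List.enumerate agente 0).map (fun p' => p'.2 + p'.1)).count (p.2 + p.1) : Int)
      - 1 := by
  set P : (Int × Int) → Bool := fun p' => decide (p'.2 - p'.1 = p.2 - p.1) with hP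
  set Q : (Int × Int) → Bool := fun p' => decide (p'.2 + p'.1 = p.2 + p.1) with hQ
  have hcond : (PySem.List.enumerate agente 0).countP (fun p' => decide (|p.2 - p'.2| = |p.1 - p'.1|))
      = (PySem.List.enumerate agente 0).countP (fun x => P x || Q x) := by
    apply List.countP_congr
    intro x _
    simp only [hP, hQ, decide_eq_true_eq, Bool.or_eq_true, abs_eq_abs]
    constructor <;> intro h <;> omega
  have hand : (PySem.List.enumerate agente 0).countP (fun x => P x && Q x) = 1 := by
    have hpq : ∀ x ∈ PySem.List.enumerate agente 0, (P x && Q x) = true ↔ (x == p) = true := by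
      intro x _
      simp only [hP, hQ, Bool.and_eq_true, decide_eq_true_eq, beq_iff_eq, Prod.ext_iff]
      constructor <;> rintro ⟨h1, h2⟩ <;> exact ⟨by omega, by omega⟩
    rw [List.countP_congr hpq]
    have : (PySem.List.enumerate agente 0).countP (· == p) = (PySem.List.enumerate agente 0).count p := rfl
    rw [this, List.count_eq_one_of_mem (pv_enumerate_nodup agente) hp]
  have hPc : (PySem.List.enumerate agente 0).countP P
      = ((PySem.List.enumerate agente 0).map (fun p' => p'.2 - p'.1)).count (p.2 - p.1) := by
    rw [List.count, List.countP_map]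
    apply List.countP_congr
    intro x _
    simp only [hP, Function.comp_def, beq_iff_eq, decide_eq_true_eq]
  have hQc : (PySem.List.enumerate agente 0).countP Q
      = ((PySem.List.enumerate agente 0).map (fun p' => p'.2 + p'.1)).count (p.2 + p.1) := by
    rw [List.count, List.countP_map]
    apply List.countP_congr
    intro x _
    simp only [hQ, Function.comp_def, beq_iff_eq, decide_eq_true_eq]
  have hor := pv_countP_or (PySem.List.enumerate agente 0) P Q
  unfold pvN
  rw [hcond]
  omega

theorem pv_group (ks : List Int) :
    ((PySem.Set.ofList ks).map (fun k => (ks.count k : Int) * (ks.count k : Int))).sum = pvT ks := by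
  unfold pvT
  rw [← PySem.List.dedup_eq_ofList]
  rw [← List.sum_toFinset _ (PySem.List.nodup_dedup ks)]
  rw [Finset.sum_list_map_count ks (fun x => (ks.count x : Int))]
  have hfs : (PySem.List.dedup ks).toFinset = ks.toFinset := by
    ext x; simp only [List.mem_toFinset, PySem.List.mem_dedup]
  rw [hfs]
  apply Finset.sum_congr rfl
  intro x _
  simp only [nsmul_eq_mul]

theorem pv_A_eq (agente : List Int) :
    fitnessagente agente
      = pvT ((PySem.List.enumerate agente 0).map (fun p' => p'.2 - p'.1))
      + pvT ((PySem.List.enumerate agente 0).map (fun p' => p'.2 + p'.1))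
      - 2 * agente.length := by
  unfold fitnessagente
  rw [pv_outer]
  have hmap : (PySem.List.enumerate agente 0).map (fun p => (pvN agente p : Int))
      = (PySem.List.enumerate agente 0).map (fun p =>
          (((PySem.List.enumerate agente 0).map (fun p' => p'.2 - p'.1)).count (p.2 - p.1) : Int)
          + (((PySem.List.enumerate agente 0).map (fun p' => p'.2 + p'.1)).count (p.2 + p.1) : Int)
          - 1) := List.map_congr_left (fun p hp => pv_pointwise agente p hp)
  simp only [hmap]
  have hsplit : ∀ (l : List (Int × Int)) (f g : (Int × Int) → Int),
      (l.map (fun p => f p + g p - 1)).sum = (l.map f).sum + (l.map g).sum - l.length := by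
    intro l f g
    induction l with
    | nil => simp
    | cons a t ih => simp only [List.map_cons, List.sum_cons, List.length_cons, ih]; push_cast; ring
  rw [hsplit]
  unfold pvT
  simp only [List.map_map, Function.comp_def, PySem.List.length_enumerate]
  ring

theorem pv_B_eq (agente : List Int) :
    fitnessagente_alt agente
      = pvT ((PySem.List.enumerate agente 0).map (fun p' => p'.2 - p'.1))
      + pvT ((PySem.List.enumerate agente 0).map (fun p' => p'.2 + p'.1))
      - 2 * agente.length := by
  unfold fitnessagente_alt
  dsimp only
  rw [PySem.List.foldl_prod_mk
        (fun (d : PySem.Dict Int Int) (p : Int × Int) => d.insert (p.2 - p.1) (d.getD (p.2 - p.1) 0 + 1))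
        (fun (d : PySem.Dict Int Int) (p : Int × Int) => d.insert (p.2 + p.1) (d.getD (p.2 + p.1) 0 + 1))]
  have hd : ∀ (f : Int × Int → Int),
      (PySem.List.enumerate agente 0).foldl (fun (d : PySem.Dict Int Int) p => d.insert (f p) (d.getD (f p) 0 + 1)) PySem.Dict.empty
      = PySem.Dict.counter ((PySem.List.enumerate agente 0).map f) := by
    intro f
    rw [← PySem.Dict.foldl_insert_getD_add_one_eq_counter, List.foldl_map]
  rw [hd (fun p => p.2 - p.1), hd (fun p => p.2 + p.1)]
  simp only [PySem.Dict.values, PySem.Dict.items_counter, List.map_map]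
  rw [PySem.List.foldl_add, PySem.List.foldl_add]
  have hsq : ∀ (ks : List Int),
      (List.map (fun c => c * c)
        (List.map ((fun (x : Int × Int) => x.2) ∘ fun k => (k, (List.count k ks : Int)))
          (PySem.Set.ofList ks))).sum = pvT ks := by
    intro ks
    rw [List.map_map]
    simpa [Function.comp_def] using pv_group ks
  rw [hsq, hsq]
  ring

-- ===== VERDICT (by name: the statement is the Claim_ definition above) =====
theorem fitnessagente_spec : Claim_equal_fitnessagente := by
  intro agente _
  unfold Spec_fitnessagente
  rw [pv_A_eq, pv_B_eq]
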